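-- pv_equiv track=rewrite | github.com/cranndarach/lexlib | lexlib/__init__.py | __check_addition
-- ===== SOURCE A (Python) =====
-- def __check_addition(base, candidate):
--     strikes = 0
--     for position in range(len(base)):
--         while True:
--             # If they match, break the while loop and try the next position.
--             if base[position] == candidate[position+strikes]:
--                 break
--             # Otherwise, take a strike and continue on that position,
--             # as long as it's the first strike. If it's the second strike,
--             # then they are not neighbors, so return False.
--             else:
--                 strikes += 1
--                 if strikes >= 2:
--                     return False
--     else:
--         return True
-- ===== SOURCE B (Python) =====
-- def __check_addition(base, candidate):
--     n = len(base)
--     for i in range(n + 1):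
--         if candidate[:i] + candidate[i + 1:n + 1] == base:
--             return True
--     return False
-- ===== Notes on version B (the rewrite author's own statement) =====
-- stated objective: alternative
-- what changed: Replaces A's single linear scan with a strikes counter by a generate-and-test algorithm: try every deletion position i and compare candidate[:i] + candidate[i+1:n+1] against base with slice equality; correct because a deletion works for some i iff it works at the first mismatch position.
import Mathlib
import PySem

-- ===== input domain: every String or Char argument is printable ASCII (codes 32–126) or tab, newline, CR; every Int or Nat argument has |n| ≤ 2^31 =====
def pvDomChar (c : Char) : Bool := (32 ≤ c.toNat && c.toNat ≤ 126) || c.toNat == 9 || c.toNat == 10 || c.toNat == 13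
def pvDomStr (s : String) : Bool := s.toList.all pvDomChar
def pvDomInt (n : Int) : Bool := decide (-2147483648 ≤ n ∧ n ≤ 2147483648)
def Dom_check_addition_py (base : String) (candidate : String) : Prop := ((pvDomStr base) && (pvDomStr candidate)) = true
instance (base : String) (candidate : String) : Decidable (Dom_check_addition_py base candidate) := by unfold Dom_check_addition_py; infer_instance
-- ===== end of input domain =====

-- B replaces A's one-pass strikes-counter scan by generate-and-test: try every deletion
-- position i and compare candidate[:i] + candidate[i+1:n+1] with base (objective: alternative).

-- ===== PORT A =====
-- inner `while True` loop of A: returns `some strikes'` on break, `none` on `return False`;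
-- an out-of-range candidate access (IndexError in Python, outside Pre_) also yields `none`.
def caInner (bs cs : List Char) (pos strikes : Nat) : Option Nat :=
  match PySem.List.pyGet? bs (pos : Int), PySem.List.pyGet? cs ((pos + strikes : Nat) : Int) with
  | some b, some c =>
    if b = c then some strikes
    else if h2 : strikes + 1 ≥ 2 then none
    else caInner bs cs pos (strikes + 1)
  | _, _ => none
termination_by 2 - strikes
decreasing_by omega

-- outer `for position in range(len(base))` loop, threading `strikes`
def caOuter (bs cs : List Char) (positions : List Nat) (strikes : Nat) : Bool :=
  match positions with
  | [] => true
  | p :: rest =>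
    match caInner bs cs p strikes with
    | none => false
    | some s => caOuter bs cs rest s

def check_addition_py (base : String) (candidate : String) : Bool :=
  caOuter base.toList candidate.toList (List.range base.toList.length) 0

-- ===== PORT B =====
-- `for i in range(n + 1): if candidate[:i] + candidate[i+1:n+1] == base: return True` / `return False`
def check_addition_py_alt (base : String) (candidate : String) : Bool :=
  let bs := base.toList
  let cs := candidate.toList
  let n := bs.length
  (List.range (n + 1)).any (fun i =>
    PySem.List.slice cs none (some (i : Int)) ++
      PySem.List.slice cs (some ((i : Int) + 1)) (some ((n : Int) + 1)) == bs)

-- ===== PRECONDITION & SPEC =====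
-- Pre_ excludes exactly the inputs on which Python A raises IndexError (candidate too
-- short at some access point); B returns False on all of those inputs.
def Pre_check_addition_py (base : String) (candidate : String) : Prop :=
  let bs := base.toList
  let cs := candidate.toList
  let n := bs.length
  let m := cs.length
  (n ≤ m ∧ ∀ i, i < n → bs.getD i ' ' = cs.getD i ' ')
  ∨ ∃ p, p < n ∧ p < m ∧ (∀ i, i < p → bs.getD i ' ' = cs.getD i ' ')
      ∧ bs.getD p ' ' ≠ cs.getD p ' '
      ∧ (n + 1 ≤ m ∨ ∃ k, k < n ∧ p ≤ k ∧ k + 1 < m ∧ bs.getD k ' ' ≠ cs.getD (k + 1) ' ')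
instance (base : String) (candidate : String) : Decidable (Pre_check_addition_py base candidate) := by
  unfold Pre_check_addition_py; infer_instance

def pvWitness_check_addition_py : String × String := ("ab", "acb")

def Spec_check_addition_py (base : String) (candidate : String) (out : Bool) : Prop := out = check_addition_py_alt base candidate
instance (base : String) (candidate : String) (out : Bool) : Decidable (Spec_check_addition_py base candidate out) := by unfold Spec_check_addition_py; infer_instance

-- ===== CLAIM (what is proved, stated in full; the proofs are below) =====
def Claim_equal_check_addition_py : Prop := ∀ (base : String) (candidate : String), Dom_check_addition_py base candidate → Pre_check_addition_py base candidate → Spec_check_addition_py base candidate (check_addition_py base candidate)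

-- ===== LEMMAS AND PROOFS =====

-- proof-internal helpers: longest common prefix scan and shifted-suffix scan
def pfx (bs cs : List Char) (p : Nat) : Nat :=
  if h : p < bs.length then
    if PySem.List.pyGet? bs (p : Int) = PySem.List.pyGet? cs (p : Int) then pfx bs cs (p + 1) else p
  else p
termination_by bs.length - p
decreasing_by omega

def ph2 (bs cs : List Char) (ks : List Nat) : Bool :=
  match ks with
  | [] => true
  | k :: rest =>
    if PySem.List.pyGet? bs (k : Int) ≠ PySem.List.pyGet? cs ((k + 1 : Nat) : Int) then false
    else ph2 bs cs rest

theorem caInner_one (bs cs : List Char) (k : Nat) (hk : k < bs.length) :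
    caInner bs cs k 1 = if some bs[k] = cs[k + 1]? then some 1 else none := by
  rw [caInner]
  simp only [PySem.List.pyGet?_natCast, List.getElem?_eq_getElem hk]
  cases h : cs[k + 1]? with
  | none => simp
  | some c => by_cases hbc : bs[k] = c <;> simp [hbc]

theorem cs_next_none (cs : List Char) (k : Nat) (h : cs[k]? = none) : cs[k + 1]? = none := by
  rw [List.getElem?_eq_none_iff] at h ⊢; omega

theorem caInner_zero (bs cs : List Char) (k : Nat) (hk : k < bs.length) :
    caInner bs cs k 0 = if some bs[k] = cs[k]? then some 0 else caInner bs cs k 1 := by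
  rw [caInner]
  simp only [PySem.List.pyGet?_natCast, Nat.add_zero, List.getElem?_eq_getElem hk]
  cases h : cs[k]? with
  | none =>
    simp [caInner_one bs cs k hk, cs_next_none cs k h]
  | some c =>
    by_cases hbc : bs[k] = c <;> simp [hbc]

theorem phase2_eq (bs cs : List Char) (l : List Nat) (h : ∀ k ∈ l, k < bs.length) :
    caOuter bs cs l 1 = ph2 bs cs l := by
  induction l with
  | nil => rfl
  | cons k rest ih =>
    have hk : k < bs.length := h k (by simp)
    have hrest : ∀ k ∈ rest, k < bs.length := fun x hx => h x (by simp [hx])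
    simp only [caOuter, ph2, caInner_one bs cs k hk, PySem.List.pyGet?_natCast,
      List.getElem?_eq_getElem hk]
    cases hc : cs[k + 1]? with
    | none => simp
    | some c =>
      by_cases hbc : bs[k] = c
      · simp [hbc, ih hrest]
      · simp [hbc]

theorem pfx_stop_simple (bs cs : List Char) (p : Nat) (h : ¬ p < bs.length) :
    pfx bs cs p = p := by rw [pfx]; simp [h]

theorem mainAux (bs cs : List Char) (d : Nat) :
    ∀ p : Nat, p ≤ bs.length → bs.length - p = d →
    caOuter bs cs (List.range' p (bs.length - p)) 0 =
      (if pfx bs cs p = bs.length then true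
       else ph2 bs cs (List.range' (pfx bs cs p) (bs.length - pfx bs cs p))) := by
  induction d with
  | zero =>
    intro p hp hd
    have hpn : p = bs.length := by omega
    rw [pfx_stop_simple bs cs p (by omega)]
    simp [hpn, caOuter]
  | succ d ih =>
    intro p hp hd
    have hpl : p < bs.length := by omega
    have hsplit : List.range' p (bs.length - p) = p :: List.range' (p + 1) d := by
      rw [hd, List.range'_succ]
    rw [hsplit]
    simp only [caOuter, caInner_zero bs cs p hpl]
    by_cases hmatch : some bs[p] = cs[p]?
    · have hstep : pfx bs cs p = pfx bs cs (p + 1) := by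
        rw [pfx]
        simp [hpl, PySem.List.pyGet?_natCast, hmatch]
      have hd1 : bs.length - (p + 1) = d := by omega
      rw [if_pos hmatch, hstep, ← hd1]
      exact ih (p + 1) (by omega) hd1
    · have hstop : pfx bs cs p = p := by
        rw [pfx]
        simp [hpl, PySem.List.pyGet?_natCast, hmatch]
      rw [if_neg hmatch, hstop, if_neg (by omega : ¬ p = bs.length), hd, List.range'_succ]
      rw [caInner_one bs cs p hpl]
      simp only [ph2, PySem.List.pyGet?_natCast, List.getElem?_eq_getElem hpl]
      by_cases hnext : some bs[p] = cs[p + 1]?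
      · have hrest : ∀ k ∈ List.range' (p + 1) d, k < bs.length := by
          intro k hkmem
          have := List.mem_range'.mp hkmem
          omega
        simp [hnext, phase2_eq bs cs _ hrest]
      · simp [hnext]

-- properties of the prefix scan
theorem pfx_le (bs cs : List Char) (d : Nat) :
    ∀ p, p ≤ bs.length → bs.length - p = d → pfx bs cs p ≤ bs.length := by
  induction d with
  | zero => intro p hp hd; rw [pfx_stop_simple bs cs p (by omega)]; omega
  | succ d ih =>
    intro p hp hd
    rw [pfx]
    split_ifs with h1 h2
    · exact ih (p + 1) (by omega) (by omega)
    · omega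
    · omega

theorem pfx_mem (bs cs : List Char) (d : Nat) :
    ∀ p, bs.length - p = d → ∀ i, p ≤ i → i < pfx bs cs p →
      PySem.List.pyGet? bs (i : Int) = PySem.List.pyGet? cs (i : Int) := by
  induction d with
  | zero =>
    intro p hd i hpi hi
    rw [pfx_stop_simple bs cs p (by omega)] at hi; omega
  | succ d ih =>
    intro p hd i hpi hi
    rw [pfx] at hi
    split_ifs at hi with h1 h2
    · rcases Nat.eq_or_lt_of_le hpi with rfl | hlt
      · exact h2
      · exact ih (p + 1) (by omega) i hlt hi
    · omega
    · omega

theorem pfx_stop (bs cs : List Char) (d : Nat) :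
    ∀ p, bs.length - p = d → pfx bs cs p < bs.length →
      PySem.List.pyGet? bs ((pfx bs cs p : Nat) : Int) ≠ PySem.List.pyGet? cs ((pfx bs cs p : Nat) : Int) := by
  induction d with
  | zero =>
    intro p hd hlt
    rw [pfx_stop_simple bs cs p (by omega)] at hlt
    omega
  | succ d ih =>
    intro p hd hlt
    rw [pfx] at hlt ⊢
    split_ifs at hlt ⊢ with h1 h2
    · exact ih (p + 1) (by omega) hlt
    · exact h2
    · omega

theorem ph2_iff (bs cs : List Char) (l : List Nat) :
    ph2 bs cs l = true ↔ ∀ k ∈ l, PySem.List.pyGet? bs (k : Int) = PySem.List.pyGet? cs ((k + 1 : Nat) : Int) := by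
  induction l with
  | nil => simp [ph2]
  | cons k rest ih =>
    rw [ph2]
    by_cases h : PySem.List.pyGet? bs (k : Int) = PySem.List.pyGet? cs ((k + 1 : Nat) : Int)
    · rw [if_neg (not_not_intro h), ih]
      constructor
      · intro hr k' hk'
        rcases List.mem_cons.mp hk' with rfl | hm
        · exact h
        · exact hr _ hm
      · intro ha k' hm
        exact ha k' (List.mem_cons_of_mem _ hm)
    · rw [if_pos h]
      simp only [Bool.false_eq_true, false_iff]
      exact fun ha => h (ha k (by simp))

-- the "deletion at position i" value B compares against bs
def delAt (cs : List Char) (n i : Nat) : List Char :=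
  cs.take i ++ (cs.drop (i + 1)).take (n - i)

theorem delAt_eq (bs cs : List Char) (p : Nat) (hp : p ≤ bs.length)
    (hpre : ∀ j, j < p → cs[j]? = bs[j]?)
    (hsh : ∀ k, p ≤ k → k < bs.length → cs[k + 1]? = bs[k]?) :
    delAt cs bs.length p = bs := by
  have hpm : p ≤ cs.length := by
    rcases Nat.eq_zero_or_pos p with rfl | hpos
    · omega
    · have := hpre (p - 1) (by omega)
      have hb : bs[p-1]? = some bs[p-1] := List.getElem?_eq_getElem (by omega)
      rw [hb] at this
      have := (List.getElem?_eq_some_iff.mp this).1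
      omega
  have hm2 : p < bs.length → bs.length < cs.length := by
    intro hplt
    have hcm := hsh (bs.length - 1) (by omega) (by omega)
    have h1 : bs.length - 1 + 1 = bs.length := by omega
    rw [h1] at hcm
    have hb : bs[bs.length - 1]? = some bs[bs.length - 1] := List.getElem?_eq_getElem (by omega)
    rw [hb] at hcm
    exact (List.getElem?_eq_some_iff.mp hcm).1
  have hlen : (delAt cs bs.length p).length = bs.length := by
    unfold delAt
    simp only [List.length_append, List.length_take, List.length_drop]
    by_cases hpn : p = bs.length
    · omega
    · have := hm2 (by omega)
      omega
  apply List.ext_getElem?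
  intro j
  by_cases hj : j < bs.length
  · unfold delAt
    by_cases hjp : j < p
    · rw [List.getElem?_append_left (by simp; omega)]
      rw [List.getElem?_take_of_lt hjp]
      exact hpre j hjp
    · have hlent : (cs.take p).length = p := by simp; omega
      rw [List.getElem?_append_right (by omega)]
      rw [hlent]
      rw [List.getElem?_take_of_lt (by omega : j - p < bs.length - p)]
      rw [List.getElem?_drop]
      have he : p + 1 + (j - p) = j + 1 := by omega
      rw [he]
      exact hsh j (by omega) hj
  · rw [List.getElem?_eq_none_iff.mpr (show (delAt cs bs.length p).length ≤ j by rw [hlen]; omega),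
        List.getElem?_eq_none_iff.mpr (show bs.length ≤ j by omega)]

theorem delAt_inv_pre (bs cs : List Char) (i : Nat) (hi : i ≤ bs.length)
    (h : delAt cs bs.length i = bs) :
    ∀ j, j < i → cs[j]? = bs[j]? := by
  intro j hj
  have hq : (cs.take i ++ (cs.drop (i + 1)).take (bs.length - i))[j]? = bs[j]? := by
    show (delAt cs bs.length i)[j]? = bs[j]?
    rw [h]
  by_cases hjm : j < cs.length
  · rw [List.getElem?_append_left (by simp; omega)] at hq
    rw [List.getElem?_take_of_lt hj] at hq
    exact hq
  · exfalso
    have hlent : (cs.take i).length = cs.length := by simp; omega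
    rw [List.getElem?_append_right (by omega)] at hq
    have hdrop : cs.drop (i + 1) = [] := List.drop_eq_nil_of_le (by omega)
    rw [hdrop] at hq
    simp only [List.take_nil, List.getElem?_nil] at hq
    have hb : bs[j]? = some bs[j] := List.getElem?_eq_getElem (by omega)
    rw [hb] at hq
    cases hq

theorem delAt_inv_shift (bs cs : List Char) (i : Nat) (hi : i ≤ bs.length)
    (h : delAt cs bs.length i = bs) :
    ∀ k, i ≤ k → k < bs.length → cs[k + 1]? = bs[k]? := by
  intro k hik hk
  have hq : (cs.take i ++ (cs.drop (i + 1)).take (bs.length - i))[k]? = bs[k]? := by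
    show (delAt cs bs.length i)[k]? = bs[k]?
    rw [h]
  by_cases him : i ≤ cs.length
  · have hlent : (cs.take i).length = i := by simp; omega
    rw [List.getElem?_append_right (by omega), hlent] at hq
    rw [List.getElem?_take_of_lt (by omega : k - i < bs.length - i)] at hq
    rw [List.getElem?_drop] at hq
    have he : i + 1 + (k - i) = k + 1 := by omega
    rwa [he] at hq
  · exfalso
    have hlent : (cs.take i).length = cs.length := by simp; omega
    rw [List.getElem?_append_right (by omega), hlent] at hq
    have hdrop : cs.drop (i + 1) = [] := List.drop_eq_nil_of_le (by omega)
    rw [hdrop] at hq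
    simp only [List.take_nil, List.getElem?_nil] at hq
    have hb : bs[k]? = some bs[k] := List.getElem?_eq_getElem hk
    rw [hb] at hq
    cases hq

-- main list-level equivalence (holds for all bs, cs)
theorem main_list (bs cs : List Char) :
    caOuter bs cs (List.range bs.length) 0 =
      (List.range (bs.length + 1)).any (fun i => delAt cs bs.length i == bs) := by
  set n := bs.length with hn
  set p := pfx bs cs 0 with hpdef
  have hple : p ≤ n := pfx_le bs cs n 0 (by omega) (by omega)
  have hA : caOuter bs cs (List.range n) 0 =
      (if p = n then true else ph2 bs cs (List.range' p (n - p))) := by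
    rw [List.range_eq_range']
    have := mainAux bs cs n 0 (Nat.zero_le _) (by omega)
    simpa using this
  rw [hA]
  -- characterize both sides as propositions
  have hiffA : (if p = n then true else ph2 bs cs (List.range' p (n - p))) = true ↔
      ∀ k, p ≤ k → k < n → PySem.List.pyGet? bs (k : Int) = PySem.List.pyGet? cs ((k + 1 : Nat) : Int) := by
    by_cases hpn : p = n
    · simp [hpn]; intro k h1 h2; omega
    · rw [if_neg hpn, ph2_iff]
      constructor
      · intro hall k h1 h2
        exact hall k (List.mem_range'_1.mpr ⟨h1, by omega⟩)
      · intro hall k hk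
        have := List.mem_range'_1.mp hk
        exact hall k this.1 (by omega)
  have hiffB : ((List.range (n + 1)).any (fun i => delAt cs n i == bs)) = true ↔
      ∃ i, i ≤ n ∧ delAt cs n i = bs := by
    rw [List.any_eq_true]
    constructor
    · rintro ⟨i, hmem, hbeq⟩
      exact ⟨i, by have := List.mem_range.mp hmem; omega, by simpa using hbeq⟩
    · rintro ⟨i, hle, heq⟩
      exact ⟨i, List.mem_range.mpr (by omega), by simpa using heq⟩
  -- prove propositional equivalence, then conclude on Bool
  have hmain : (∀ k, p ≤ k → k < n → PySem.List.pyGet? bs (k : Int) = PySem.List.pyGet? cs ((k + 1 : Nat) : Int))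
      ↔ ∃ i, i ≤ n ∧ delAt cs n i = bs := by
    constructor
    · intro hall
      refine ⟨p, hple, ?_⟩
      apply delAt_eq bs cs p hple
      · intro j hj
        have := pfx_mem bs cs n 0 (by omega) j (by omega) (by rwa [← hpdef])
        simp only [PySem.List.pyGet?_natCast] at this
        exact this.symm
      · intro k h1 h2
        have := hall k h1 h2
        simp only [PySem.List.pyGet?_natCast] at this
        exact this.symm
    · rintro ⟨i, hle, heq⟩
      have hpre := delAt_inv_pre bs cs i hle heq
      have hsh := delAt_inv_shift bs cs i hle heq
      have hip : i ≤ p := by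
        by_contra hcon
        push_neg at hcon
        have hplt : p < n := by omega
        have := pfx_stop bs cs n 0 (by omega) (by rwa [← hpdef])
        rw [← hpdef] at this
        apply this
        simp only [PySem.List.pyGet?_natCast]
        exact (hpre p hcon).symm
      intro k h1 h2
      have := hsh k (by omega) h2
      simp only [PySem.List.pyGet?_natCast]
      exact this.symm
  cases hb : ((List.range (n + 1)).any (fun i => delAt cs n i == bs)) with
  | true => rw [hiffA, hmain, ← hiffB]; exact hb
  | false =>
    cases hA2 : (if p = n then true else ph2 bs cs (List.range' p (n - p))) with
    | false => rfl
    | true =>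
      exfalso
      have hx := hiffB.mpr (hmain.mp (hiffA.mp hA2))
      rw [hb] at hx
      cases hx

-- ===== VERDICT (by name: the statement is the Claim_ definition above) =====
theorem check_addition_py_spec : Claim_equal_check_addition_py := by
  intro base candidate _ _
  unfold Spec_check_addition_py check_addition_py check_addition_py_alt
  rw [main_list]
  congr 1
  funext i
  congr 1
  unfold delAt
  rw [PySem.List.slice_to_natCast]
  have h1 : ((i : Int) + 1) = ((i + 1 : Nat) : Int) := by push_cast; ring
  have h2 : ((base.toList.length : Int) + 1) = ((base.toList.length + 1 : Nat) : Int) := by push_cast; ring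
  rw [h1, h2, PySem.List.slice_natCast]
  congr 2
  omega
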